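-- pv_equiv track=rewrite | github.com/lindeb2/Apollo | PanTest/Test.py | filter_A_max_smallest_neighbor_pair
-- ===== SOURCE A (Python) =====
-- def get_neighbors_diff(perm):
--     """Returns a list of absolute differences between neighbors."""
--     return [abs(perm[i] - perm[i + 1]) for i in range(len(perm) - 1)]
--
-- def filter_A_max_smallest_neighbor_pair(candidates):
--     best_score = -1
--     scored_candidates = []
--
--     for perm in candidates:
--         diffs = get_neighbors_diff(perm)
--         min_diff = min(diffs)
--
--         if min_diff > best_score:
--             best_score = min_diff
--             scored_candidates = [perm]
--         elif min_diff == best_score: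
--             scored_candidates.append(perm)
--
--     return scored_candidates
-- ===== SOURCE B (Python) =====
-- def get_neighbors_diff(perm):
--     """Returns a list of absolute differences between neighbors."""
--     return [abs(perm[i] - perm[i + 1]) for i in range(len(perm) - 1)]
--
-- def filter_A_max_smallest_neighbor_pair(candidates):
--     # Two distinct passes: materialize every candidate's min neighbor diff,
--     # then filter against the global maximum (default -1 keeps [] -> []).
--     scores = [min(get_neighbors_diff(p)) for p in candidates]
--     best = max(scores, default=-1)
--     return [p for p, s in zip(candidates, scores) if s == best]
-- ===== Notes on version B (the rewrite author's own statement) =====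
-- stated objective: simpler
-- what changed: Replaces A's single streaming pass that tracks a running best and rebuilds/extends the winner list branch by branch with two plain passes: a scores list comprehension, max(scores, default=-1), and one order-preserving filter comprehension.
import Mathlib
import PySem

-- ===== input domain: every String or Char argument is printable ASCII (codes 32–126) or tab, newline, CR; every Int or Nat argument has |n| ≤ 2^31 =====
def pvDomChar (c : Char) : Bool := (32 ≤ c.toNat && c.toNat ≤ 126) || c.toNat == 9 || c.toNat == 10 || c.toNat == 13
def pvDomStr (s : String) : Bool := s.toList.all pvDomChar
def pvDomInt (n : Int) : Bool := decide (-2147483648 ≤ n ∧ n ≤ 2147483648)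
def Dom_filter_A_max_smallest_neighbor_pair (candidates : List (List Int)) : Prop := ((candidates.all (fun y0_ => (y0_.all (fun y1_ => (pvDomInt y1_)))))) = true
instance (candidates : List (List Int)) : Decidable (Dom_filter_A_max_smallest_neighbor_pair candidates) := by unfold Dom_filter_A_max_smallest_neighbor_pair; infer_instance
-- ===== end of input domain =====

-- B replaces A's single streaming pass (running best + branchy winner-list rebuilding) by two plain passes: a score list, its max, and one filter; return values proved equal on Pre_.


-- ===== PORT A =====
-- helper: [abs(perm[i] - perm[i+1]) for i in range(len(perm) - 1)]
def get_neighbors_diff (perm : List Int) : List Int :=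
  (PySem.List.pyRange 0 ((perm.length : Int) - 1) 1).map (fun i =>
    |(PySem.List.pyGet? perm i).getD 0 - (PySem.List.pyGet? perm (i + 1)).getD 0|)

-- A's loop body; min(diffs) raises ValueError in Python when diffs = [] (perm shorter than 2):
-- those inputs are excluded by Pre_, so the .getD 0 default is never reached inside Pre_
def stepA (st : Int × List (List Int)) (perm : List Int) : Int × List (List Int) :=
  let diffs := get_neighbors_diff perm
  let min_diff := (PySem.List.min? diffs (fun x => x)).getD 0
  if min_diff > st.1 then (min_diff, [perm])
  else if min_diff = st.1 then (st.1, st.2 ++ [perm])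
  else st

def filter_A_max_smallest_neighbor_pair (candidates : List (List Int)) : List (List Int) :=
  (candidates.foldl stepA ((-1 : Int), ([] : List (List Int)))).2

-- ===== PORT B =====
def filter_A_max_smallest_neighbor_pair_alt (candidates : List (List Int)) : List (List Int) :=
  let scores := candidates.map (fun p => (PySem.List.min? (get_neighbors_diff p) (fun x => x)).getD 0)
  let best := PySem.List.maxD scores (fun x => x) (-1)
  ((candidates.zip scores).filter (fun ps => ps.2 == best)).map Prod.fst

-- ===== PRECONDITION & SPEC =====
-- Pre_ excludes inputs containing a list of length < 2: there min() is applied to an empty diff list and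
-- both A and B raise ValueError (no value is returned by either program).
def Pre_filter_A_max_smallest_neighbor_pair (candidates : List (List Int)) : Prop :=
  ∀ perm ∈ candidates, 2 ≤ perm.length
instance (candidates : List (List Int)) : Decidable (Pre_filter_A_max_smallest_neighbor_pair candidates) := by unfold Pre_filter_A_max_smallest_neighbor_pair; infer_instance

def pvWitness_filter_A_max_smallest_neighbor_pair : List (List Int) := [[1, 3, 6], [2, 4], [7, 9]]

def Spec_filter_A_max_smallest_neighbor_pair (candidates : List (List Int)) (out : List (List Int)) : Prop := out = filter_A_max_smallest_neighbor_pair_alt candidates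
instance (candidates : List (List Int)) (out : List (List Int)) : Decidable (Spec_filter_A_max_smallest_neighbor_pair candidates out) := by unfold Spec_filter_A_max_smallest_neighbor_pair; infer_instance

-- ===== CLAIM (what is proved, stated in full; the proofs are below) =====
def Claim_equal_filter_A_max_smallest_neighbor_pair : Prop := ∀ (candidates : List (List Int)), Dom_filter_A_max_smallest_neighbor_pair candidates → Pre_filter_A_max_smallest_neighbor_pair candidates → Spec_filter_A_max_smallest_neighbor_pair candidates (filter_A_max_smallest_neighbor_pair candidates)

-- ===== LEMMAS AND PROOFS =====

-- the per-candidate score both programs compute: min of the neighbor diffs (0 standing in for the excluded empty case)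
def pvScore (p : List Int) : Int := (PySem.List.min? (get_neighbors_diff p) (fun x => x)).getD 0

lemma stepA_eq (b : Int) (acc : List (List Int)) (p : List Int) :
    stepA (b, acc) p = if pvScore p > b then (pvScore p, [p])
      else if pvScore p = b then (b, acc ++ [p]) else (b, acc) := rfl

lemma le_foldl_max_score (l : List (List Int)) (b : Int) :
    b ≤ l.foldl (fun x p => max x (pvScore p)) b := by
  induction l generalizing b with
  | nil => simp
  | cons p t ih => exact le_trans (le_max_left _ _) (ih (max b (pvScore p)))

-- invariant of A's streaming loop: from state (b, acc) it yields the running max M and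
-- (acc if M stayed b, else nothing) followed by the elements scoring exactly M, in order
lemma foldA_eq (l : List (List Int)) (b : Int) (acc : List (List Int)) :
    l.foldl stepA (b, acc)
    = (l.foldl (fun x p => max x (pvScore p)) b,
       (if l.foldl (fun x p => max x (pvScore p)) b = b then acc else [])
         ++ l.filter (fun p => pvScore p == l.foldl (fun x p => max x (pvScore p)) b)) := by
  induction l generalizing b acc with
  | nil => simp
  | cons p t ih =>
    simp only [List.foldl_cons, List.filter_cons, stepA_eq]
    rcases lt_trichotomy b (pvScore p) with h1 | h1 | h1
    · have hb' : max b (pvScore p) = pvScore p := max_eq_right h1.le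
      rw [if_pos h1, ih]; simp only [hb']
      have hM : t.foldl (fun x p => max x (pvScore p)) (pvScore p) ≠ b := by
        have := le_foldl_max_score t (pvScore p); omega
      by_cases h2 : t.foldl (fun x p => max x (pvScore p)) (pvScore p) = pvScore p
      · simp [h2, h1.ne']
      · have h3 : (pvScore p == t.foldl (fun x p => max x (pvScore p)) (pvScore p)) = false := by
          have := le_foldl_max_score t (pvScore p); simp; omega
        simp [h2, hM, h3]
    · have hb' : max b (pvScore p) = b := max_eq_left h1.ge
      rw [if_neg (by omega), if_pos h1.symm, ih]; simp only [hb']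
      by_cases h2 : t.foldl (fun x p => max x (pvScore p)) b = b
      · simp [← h1, h2]
      · simp [← h1, h2, Ne.symm h2]
    · have hb' : max b (pvScore p) = b := max_eq_left h1.le
      rw [if_neg (by omega), if_neg (by omega), ih]; simp only [hb']
      have h3 : (pvScore p == t.foldl (fun x p => max x (pvScore p)) b) = false := by
        have := le_foldl_max_score t b; simp; omega
      simp [h3]

lemma pvScore_nonneg (p : List Int) : 0 ≤ pvScore p := by
  unfold pvScore
  cases h : PySem.List.min? (get_neighbors_diff p) (fun x => x) with
  | none => simp
  | some m =>
    have hm := PySem.List.min?_mem h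
    simp only [get_neighbors_diff, List.mem_map] at hm
    obtain ⟨i, _, rfl⟩ := hm
    simp [abs_nonneg]

lemma zip_filter_map (l : List (List Int)) (best : Int) :
    ((l.zip (l.map pvScore)).filter (fun ps => ps.2 == best)).map Prod.fst
      = l.filter (fun p => pvScore p == best) := by
  induction l with
  | nil => rfl
  | cons p t ih =>
    simp only [List.map_cons, List.zip_cons_cons, List.filter_cons]
    by_cases h : (pvScore p == best) = true
    · simp [h, ih]
    · simp [h, ih]

-- B's max(scores, default=-1) equals A's running maximum (scores are ≥ 0, so the -1 seed is absorbed)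
lemma best_eq (candidates : List (List Int)) :
    PySem.List.maxD (candidates.map pvScore) (fun x => x) (-1)
      = candidates.foldl (fun x p => max x (pvScore p)) (-1) := by
  cases candidates with
  | nil => rfl
  | cons p t =>
    simp only [List.map_cons, PySem.List.maxD, PySem.List.max?_id_cons, Option.getD_some,
      List.foldl_cons, List.foldl_map]
    have : max (-1 : Int) (pvScore p) = pvScore p :=
      max_eq_right (le_trans (by norm_num) (pvScore_nonneg p))
    rw [this]

lemma ab_eq (candidates : List (List Int)) :
    filter_A_max_smallest_neighbor_pair candidates = filter_A_max_smallest_neighbor_pair_alt candidates := by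
  unfold filter_A_max_smallest_neighbor_pair filter_A_max_smallest_neighbor_pair_alt
  rw [foldA_eq]
  show _ = ((candidates.zip (candidates.map pvScore)).filter _).map Prod.fst
  rw [zip_filter_map]
  rw [show List.map (fun p => (PySem.List.min? (get_neighbors_diff p) (fun x => x)).getD 0) candidates
        = candidates.map pvScore from rfl, best_eq]
  simp

-- ===== VERDICT (by name: the statement is the Claim_ definition above) =====
theorem filter_A_max_smallest_neighbor_pair_spec : Claim_equal_filter_A_max_smallest_neighbor_pair := by
  intro candidates _ _
  unfold Spec_filter_A_max_smallest_neighbor_pair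
  exact ab_eq candidates
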